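-- pv_equiv track=rewrite | github.com/emmastenhuus/it-camp | mathfun/tokenizer.py | tokenize_constant
-- ===== SOURCE A (Python) =====
-- NUMBERS = ["0", "1", "2", "3", "4", "5", "6", "7", "8", "9"]
--
-- def tokenize_constant(expr: str, index: int) -> str:
--     constant = ""
--     while index < len(expr):
--         ch = expr[index]
--         if ch in NUMBERS:
--             constant = constant + ch
--         else:
--             return constant
--         index = index + 1
--     return constant
-- ===== SOURCE B (Python) =====
-- def tokenize_constant(expr: str, index: int) -> str:
--     # Phase 1: find the end of the digit run; Phase 2: extract it by index range.
--     end = index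
--     while end < len(expr) and '0' <= expr[end] <= '9':
--         end = end + 1
--     return ''.join(expr[i] for i in range(index, end))
-- ===== Notes on version B (the rewrite author's own statement) =====
-- stated objective: alternative
-- what changed: Replaced A's single accumulate-as-you-scan loop (growing string, membership test against a digit list) by a two-phase scan: first compute only the end index of the digit run with character-range comparisons, then extract the run with one join over range(index, end).
import Mathlib
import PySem

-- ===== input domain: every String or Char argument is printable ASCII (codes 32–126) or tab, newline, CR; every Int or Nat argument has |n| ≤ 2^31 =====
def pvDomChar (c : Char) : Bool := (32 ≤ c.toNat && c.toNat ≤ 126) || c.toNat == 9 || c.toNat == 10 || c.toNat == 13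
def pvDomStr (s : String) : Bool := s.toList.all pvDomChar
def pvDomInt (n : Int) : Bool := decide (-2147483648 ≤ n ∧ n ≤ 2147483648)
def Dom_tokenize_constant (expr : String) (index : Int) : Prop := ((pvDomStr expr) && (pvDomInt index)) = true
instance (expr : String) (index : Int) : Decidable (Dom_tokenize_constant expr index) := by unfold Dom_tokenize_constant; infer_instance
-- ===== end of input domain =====

-- B replaces A's accumulate-as-you-scan loop by a two-phase scan (find end index, then
-- extract the run by an index range); objective: alternative decomposition.

-- ===== PORT A =====
-- NUMBERS = ["0", …, "9"]: Python's 1-char strings are Chars here.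
def pvNUMBERS : List Char := ['0', '1', '2', '3', '4', '5', '6', '7', '8', '9']

-- A's while loop; expr[index] = pyGet? (none = IndexError, excluded by Pre_; the port
-- returns the accumulator there, faithfulness is only claimed inside Pre_)
def tokAuxA (s : List Char) (index : Int) (constant : List Char) : List Char :=
  if _h : index < (s.length : Int) then
    match PySem.List.pyGet? s index with
    | none => constant
    | some ch =>
      if ch ∈ pvNUMBERS then tokAuxA s (index + 1) (constant ++ [ch])
      else constant
  else constant
termination_by ((s.length : Int) - index).toNat
decreasing_by omega

def tokenize_constant (expr : String) (index : Int) : String :=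
  String.ofList (tokAuxA expr.toList index [])

-- ===== PORT B =====
-- Phase 1: 'while end < len(expr) and '0' <= expr[end] <= '9': end += 1'.
-- The chained comparison on expr[end] reads the character (IndexError = none, outside Pre_;
-- the phase stops there, faithfulness is only claimed inside Pre_).
def endB (s : List Char) (e : Int) : Int :=
  if _h : e < (s.length : Int) then
    match PySem.List.pyGet? s e with
    | none => e
    | some ch => if '0' ≤ ch ∧ ch ≤ '9' then endB s (e + 1) else e
  else e
termination_by ((s.length : Int) - e).toNat
decreasing_by omega

-- Phase 2: ''.join(expr[i] for i in range(index, end)); every i read is in range under Pre_,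
-- the ' ' default of pyGetD is never used there.
def tokenize_constant_alt (expr : String) (index : Int) : String :=
  String.ofList
    ((PySem.List.pyRange index (endB expr.toList index) 1).map
      (fun i => PySem.List.pyGetD expr.toList i ' '))

-- ===== PRECONDITION & SPEC =====
-- Pre_ excludes exactly the inputs where Python A raises IndexError (index < -len(expr)); B raises there too.
def Pre_tokenize_constant (expr : String) (index : Int) : Prop :=
  -((expr.toList.length : Int)) ≤ index
instance (expr : String) (index : Int) : Decidable (Pre_tokenize_constant expr index) := by
  unfold Pre_tokenize_constant; infer_instance

def pvWitness_tokenize_constant : String × Int := ("12a", 0)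

def Spec_tokenize_constant (expr : String) (index : Int) (out : String) : Prop := out = tokenize_constant_alt expr index
instance (expr : String) (index : Int) (out : String) : Decidable (Spec_tokenize_constant expr index out) := by unfold Spec_tokenize_constant; infer_instance

-- ===== CLAIM (what is proved, stated in full; the proofs are below) =====
def Claim_equal_tokenize_constant : Prop := ∀ (expr : String) (index : Int), Dom_tokenize_constant expr index → Pre_tokenize_constant expr index → Spec_tokenize_constant expr index (tokenize_constant expr index)

-- ===== LEMMAS AND PROOFS =====

lemma digit_mem_iff (ch : Char) : ch ∈ pvNUMBERS ↔ ('0' ≤ ch ∧ ch ≤ '9') := by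
  constructor
  · intro h
    fin_cases h <;> exact ⟨by decide, by decide⟩
  · rintro ⟨h1, h2⟩
    have h1' : 48 ≤ ch.toNat := h1
    have h2' : ch.toNat ≤ 57 := h2
    have hofnat : Char.ofNat ch.toNat = ch := Char.ofNat_toNat ch
    interval_cases h : ch.toNat <;>
      (rw [← hofnat]; decide)

lemma endB_ge (s : List Char) (e : Int) : e ≤ endB s e := by
  unfold endB
  split
  · rename_i hlt
    cases hg : PySem.List.pyGet? s e with
    | none => simp
    | some ch =>
      simp only [hg]
      split
      · have := endB_ge s (e + 1); omega
      · exact le_refl _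
  · exact le_refl _
termination_by ((s.length : Int) - e).toNat
decreasing_by omega

-- main invariant: A's loop from position i with accumulator acc equals
-- acc ++ the characters at positions i … endB s i - 1
lemma tokAux_eq (n : Nat) : ∀ (s : List Char) (i : Int) (acc : List Char),
    -((s.length : Int)) ≤ i →
    ((s.length : Int) - i).toNat ≤ n →
    tokAuxA s i acc =
      acc ++ (PySem.List.pyRange i (endB s i) 1).map (fun j => PySem.List.pyGetD s j ' ') := by
  induction n with
  | zero =>
    intro s i acc hpre h
    have hge : ¬ i < (s.length : Int) := by omega
    rw [tokAuxA, endB]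
    simp [hge, PySem.List.pyRange_one_eq_nil (le_refl i)]
  | succ n ih =>
    intro s i acc hpre h
    rw [tokAuxA, endB]
    by_cases hlt : i < (s.length : Int)
    · simp only [hlt, dif_pos]
      cases hg : PySem.List.pyGet? s i with
      | none =>
        -- impossible under Pre_: -len ≤ i < len means the index is in range
        exfalso
        rw [PySem.List.pyGet?_eq_none_iff] at hg
        exact hg ⟨hpre, hlt⟩
      | some ch =>
        simp only [hg]
        by_cases hd : '0' ≤ ch ∧ ch ≤ '9'
        · have hmem : ch ∈ pvNUMBERS := (digit_mem_iff ch).mpr hd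
          rw [if_pos hmem, if_pos hd]
          have hend : i < endB s (i + 1) := by
            have := endB_ge s (i + 1); omega
          rw [PySem.List.pyRange_one_cons hend, List.map_cons]
          have hget : PySem.List.pyGetD s i ' ' = ch := by
            simp [PySem.List.pyGetD, hg]
          rw [hget, ih s (i + 1) (acc ++ [ch]) (by omega) (by omega)]
          simp
        · have hmem : ch ∉ pvNUMBERS := fun hm => hd ((digit_mem_iff ch).mp hm)
          rw [if_neg hmem, if_neg hd]
          simp [PySem.List.pyRange_one_eq_nil (le_refl i)]
    · simp [hlt, PySem.List.pyRange_one_eq_nil (le_refl i)]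

-- ===== VERDICT (by name: the statement is the Claim_ definition above) =====
theorem tokenize_constant_spec : Claim_equal_tokenize_constant := by
  intro expr index _hdom hpre
  unfold Spec_tokenize_constant tokenize_constant tokenize_constant_alt
  rw [tokAux_eq ((expr.toList.length : Int) - index).toNat expr.toList index [] hpre (le_refl _)]
  rfl
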